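-- pv_equiv track=rewrite | github.com/Mostafafar/Konkor-of-kings-test | bot - 2025-10-08T232958.020.py | calculate_questions_by_pattern
-- ===== SOURCE A (Python) =====
-- def calculate_questions_by_pattern(start_question, end_question, pattern):
--     """محاسبه سوالات بر اساس الگوی انتخاب شده"""
--     all_questions = list(range(start_question, end_question + 1))
--
--     if pattern == 'all':
--         return all_questions
--     elif pattern == 'alternate':
--         # یکی در میان - بر اساس زوج/فرد بودن اولین سوال
--         if start_question % 2 == 0:  # اگر اولین سوال زوج باشد
--             return [q for q in all_questions if q % 2 == 0]  # سوالات زوج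
--         else:  # اگر اولین سوال فرد باشد
--             return [q for q in all_questions if q % 2 == 1]  # سوالات فرد
--     elif pattern == 'every_two':
--         # دو تا در میان (هر سومین سوال)
--         return [q for i, q in enumerate(all_questions, 1) if i % 3 == 1]
--     elif pattern == 'every_three':
--         # سه تا در میان (هر چهارمین سوال)
--         return [q for i, q in enumerate(all_questions, 1) if i % 4 == 1]
--     else:
--         return all_questions
-- ===== SOURCE B (Python) =====
-- def calculate_questions_by_pattern(start_question, end_question, pattern):
--     """محاسبه سوالات بر اساس الگوی انتخاب شده"""
--     step = {'alternate': 2, 'every_two': 3, 'every_three': 4}.get(pattern, 1)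
--     return list(range(start_question, end_question + 1, step))
-- ===== Notes on version B (the rewrite author's own statement) =====
-- stated objective: simpler
-- what changed: Replaces the materialised full list plus per-pattern parity/enumerate filtering by a single step lookup and one strided range(start, end+1, step) (alternate = stride 2 from start_question, every_two = stride 3, every_three = stride 4, all/unknown = stride 1).
import Mathlib
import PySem

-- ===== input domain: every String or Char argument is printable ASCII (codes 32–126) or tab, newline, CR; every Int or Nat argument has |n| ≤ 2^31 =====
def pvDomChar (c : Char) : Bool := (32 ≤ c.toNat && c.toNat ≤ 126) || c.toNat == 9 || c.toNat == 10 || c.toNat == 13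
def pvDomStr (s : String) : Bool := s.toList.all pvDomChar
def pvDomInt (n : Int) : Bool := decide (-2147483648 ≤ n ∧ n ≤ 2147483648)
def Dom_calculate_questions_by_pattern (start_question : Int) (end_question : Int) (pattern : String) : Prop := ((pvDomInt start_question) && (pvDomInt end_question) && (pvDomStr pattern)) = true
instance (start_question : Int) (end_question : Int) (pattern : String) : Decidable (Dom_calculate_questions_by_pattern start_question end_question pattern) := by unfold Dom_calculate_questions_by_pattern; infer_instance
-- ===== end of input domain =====

-- B replaces A's full list + per-pattern filtering by one step lookup and a single strided range (same values).


-- ===== PORT A =====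
def calculate_questions_by_pattern (start_question : Int) (end_question : Int) (pattern : String) : List Int :=
  let all_questions := PySem.List.pyRange start_question (end_question + 1) 1
  if pattern == "all" then all_questions
  else if pattern == "alternate" then
    if PySem.Int.mod start_question 2 == 0 then
      all_questions.filter (fun q => PySem.Int.mod q 2 == 0)
    else
      all_questions.filter (fun q => PySem.Int.mod q 2 == 1)
  else if pattern == "every_two" then
    (PySem.List.enumerate all_questions 1).filterMap
      (fun p => if PySem.Int.mod p.1 3 == 1 then some p.2 else none)
  else if pattern == "every_three" then
    (PySem.List.enumerate all_questions 1).filterMap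
      (fun p => if PySem.Int.mod p.1 4 == 1 then some p.2 else none)
  else all_questions

-- ===== PORT B =====
def calculate_questions_by_pattern_alt (start_question : Int) (end_question : Int) (pattern : String) : List Int :=
  let step := (PySem.Dict.ofList [("alternate", (2:Int)), ("every_two", 3), ("every_three", 4)]).getD pattern 1
  PySem.List.pyRange start_question (end_question + 1) step

-- ===== PRECONDITION & SPEC =====
def Spec_calculate_questions_by_pattern (start_question : Int) (end_question : Int) (pattern : String) (out : List Int) : Prop := out = calculate_questions_by_pattern_alt start_question end_question pattern
instance (start_question : Int) (end_question : Int) (pattern : String) (out : List Int) : Decidable (Spec_calculate_questions_by_pattern start_question end_question pattern out) := by unfold Spec_calculate_questions_by_pattern; infer_instance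

-- ===== CLAIM =====
def Claim_equal_calculate_questions_by_pattern : Prop := ∀ (start_question : Int) (end_question : Int) (pattern : String), Dom_calculate_questions_by_pattern start_question end_question pattern → Spec_calculate_questions_by_pattern start_question end_question pattern (calculate_questions_by_pattern start_question end_question pattern)

-- ===== LEMMAS AND PROOFS =====

-- keeping every m-th index of range n (m = 2, 3, 4) is a strided sub-range
lemma pv_filt2 (n : Nat) : (List.range n).filter (fun k => k % 2 == 0)
    = (List.range ((n+1)/2)).map (fun j => 2*j) := by
  induction n with
  | zero => simp
  | succ n ih =>
    rw [List.range_succ, List.filter_append, ih]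
    by_cases h : n % 2 = 0
    · have h2 : (n+1+1)/2 = (n+1)/2 + 1 := by omega
      rw [h2, List.range_succ, List.map_append]
      simp [h]
      omega
    · have h2 : (n+1+1)/2 = (n+1)/2 := by omega
      rw [h2]; simp [h]

lemma pv_filt3 (n : Nat) : (List.range n).filter (fun k => k % 3 == 0)
    = (List.range ((n+2)/3)).map (fun j => 3*j) := by
  induction n with
  | zero => simp
  | succ n ih =>
    rw [List.range_succ, List.filter_append, ih]
    by_cases h : n % 3 = 0
    · have h2 : (n+1+2)/3 = (n+2)/3 + 1 := by omega
      rw [h2, List.range_succ, List.map_append]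
      simp [h]
      omega
    · have h2 : (n+1+2)/3 = (n+2)/3 := by omega
      rw [h2]; simp [h]

lemma pv_filt4 (n : Nat) : (List.range n).filter (fun k => k % 4 == 0)
    = (List.range ((n+3)/4)).map (fun j => 4*j) := by
  induction n with
  | zero => simp
  | succ n ih =>
    rw [List.range_succ, List.filter_append, ih]
    by_cases h : n % 4 = 0
    · have h2 : (n+1+3)/4 = (n+3)/4 + 1 := by omega
      rw [h2, List.range_succ, List.map_append]
      simp [h]
      omega
    · have h2 : (n+1+3)/4 = (n+3)/4 := by omega
      rw [h2]; simp [h]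

lemma pv_enum_map_range (f : Nat → Int) (n : Nat) (s : Int) :
    PySem.List.enumerate (List.map f (List.range n)) s
      = (List.range n).map (fun (j:Nat) => ((s + (j:Int), f j) : Int × Int)) := by
  apply List.ext_getElem
  · simp [PySem.List.length_enumerate]
  · intro k h1 h2
    simp [PySem.List.getElem_enumerate]

lemma pv_fmap_if {α β : Type} (l : List α) (p : α → Bool) (v : α → β) :
    List.filterMap (fun j => if p j then some (v j) else none) l = (l.filter p).map v := by
  induction l with
  | nil => rfl
  | cons x xs ih =>
    by_cases h : p x <;> simp [List.filter_cons, h, ih]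

lemma pv_alt_branch (s e : Int) (r : Int) (hr : PySem.Int.mod s 2 = r) :
    (PySem.List.pyRange s e 1).filter (fun q => PySem.Int.mod q 2 == r)
      = PySem.List.pyRange s e 2 := by
  rw [PySem.List.pyRange_one, List.filter_map]
  have hc : ∀ k ∈ List.range (e - s).toNat,
      ((fun q => PySem.Int.mod q 2 == r) ∘ (fun k:Nat => s + (k:Int))) k = (k % 2 == 0) := by
    intro k _
    have hr' : s % 2 = r := by
      rwa [PySem.Int.mod_eq_emod_of_pos (a := s) (b := 2) (by norm_num)] at hr
    simp only [Function.comp,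
      PySem.Int.mod_eq_emod_of_pos (a := s + (k:Int)) (b := 2) (by norm_num)]
    simp only [Bool.beq_eq_decide_eq, decide_eq_decide]
    omega
  rw [List.filter_congr hc, pv_filt2, List.map_map,
    PySem.List.pyRange_of_pos _ _ (by norm_num : (0:Int) < 2)]
  have hcount : ((e - s).toNat + 1) / 2 = (if s < e then ((e - s + 2 - 1) / 2).toNat else 0) := by
    split <;> omega
  rw [hcount]
  apply List.map_congr_left
  intro j _
  simp [Function.comp]

lemma pv_etwo (s e : Int) :
    (PySem.List.enumerate (PySem.List.pyRange s e 1) 1).filterMap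
      (fun p => if PySem.Int.mod p.1 3 == 1 then some p.2 else none)
      = PySem.List.pyRange s e 3 := by
  rw [PySem.List.pyRange_one, pv_enum_map_range, List.filterMap_map]
  have : ((fun p : Int × Int => if PySem.Int.mod p.1 3 == 1 then some p.2 else none) ∘
      (fun (j:Nat) => ((1 + (j:Int), s + (j:Int)) : Int × Int)))
      = (fun (j:Nat) => if (fun (j:Nat) => PySem.Int.mod (1 + (j:Int)) 3 == 1) j then some ((fun (j:Nat) => s + (j:Int)) j) else none) := rfl
  rw [this, pv_fmap_if]
  have hc : ∀ k ∈ List.range (e - s).toNat,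
      (PySem.Int.mod (1 + (k:Int)) 3 == 1) = (k % 3 == 0) := by
    intro k _
    simp only [PySem.Int.mod_eq_emod_of_pos (a := 1 + (k:Int)) (b := 3) (by norm_num)]
    simp only [Bool.beq_eq_decide_eq, decide_eq_decide]
    omega
  rw [List.filter_congr hc, pv_filt3, List.map_map,
    PySem.List.pyRange_of_pos _ _ (by norm_num : (0:Int) < 3)]
  have hcount : ((e - s).toNat + 2) / 3 = (if s < e then ((e - s + 3 - 1) / 3).toNat else 0) := by
    split <;> omega
  rw [hcount]
  apply List.map_congr_left
  intro j _
  simp [Function.comp]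

lemma pv_ethree (s e : Int) :
    (PySem.List.enumerate (PySem.List.pyRange s e 1) 1).filterMap
      (fun p => if PySem.Int.mod p.1 4 == 1 then some p.2 else none)
      = PySem.List.pyRange s e 4 := by
  rw [PySem.List.pyRange_one, pv_enum_map_range, List.filterMap_map]
  have : ((fun p : Int × Int => if PySem.Int.mod p.1 4 == 1 then some p.2 else none) ∘
      (fun (j:Nat) => ((1 + (j:Int), s + (j:Int)) : Int × Int)))
      = (fun (j:Nat) => if (fun (j:Nat) => PySem.Int.mod (1 + (j:Int)) 4 == 1) j then some ((fun (j:Nat) => s + (j:Int)) j) else none) := rfl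
  rw [this, pv_fmap_if]
  have hc : ∀ k ∈ List.range (e - s).toNat,
      (PySem.Int.mod (1 + (k:Int)) 4 == 1) = (k % 4 == 0) := by
    intro k _
    simp only [PySem.Int.mod_eq_emod_of_pos (a := 1 + (k:Int)) (b := 4) (by norm_num)]
    simp only [Bool.beq_eq_decide_eq, decide_eq_decide]
    omega
  rw [List.filter_congr hc, pv_filt4, List.map_map,
    PySem.List.pyRange_of_pos _ _ (by norm_num : (0:Int) < 4)]
  have hcount : ((e - s).toNat + 3) / 4 = (if s < e then ((e - s + 4 - 1) / 4).toNat else 0) := by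
    split <;> omega
  rw [hcount]
  apply List.map_congr_left
  intro j _
  simp [Function.comp]

-- ===== VERDICT =====
theorem calculate_questions_by_pattern_spec : Claim_equal_calculate_questions_by_pattern := by
  intro s e pat _
  unfold Spec_calculate_questions_by_pattern
  unfold calculate_questions_by_pattern calculate_questions_by_pattern_alt
  by_cases h1 : pat = "all"
  · subst h1
    rw [if_pos (by decide)]
    have hstep : ((PySem.Dict.ofList [("alternate", (2:Int)), ("every_two", 3), ("every_three", 4)]).getD "all" 1) = 1 := by decide
    simp only [hstep]
  by_cases h2 : pat = "alternate"
  · subst h2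
    rw [if_neg (by decide), if_pos (by decide)]
    have hstep : ((PySem.Dict.ofList [("alternate", (2:Int)), ("every_two", 3), ("every_three", 4)]).getD "alternate" 1) = 2 := by decide
    simp only [hstep]
    by_cases hp : PySem.Int.mod s 2 = 0
    · rw [if_pos (show (PySem.Int.mod s 2 == 0) = true by simp only [hp]; decide)]
      exact pv_alt_branch s (e+1) 0 hp
    · have h1' : PySem.Int.mod s 2 = 1 := by
        have := PySem.Int.mod_nonneg s (b := 2) (by norm_num)
        have := PySem.Int.mod_lt s (b := 2) (by norm_num)
        omega
      rw [if_neg (show ¬((PySem.Int.mod s 2 == 0) = true) by simp only [h1']; decide)]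
      exact pv_alt_branch s (e+1) 1 h1'
  by_cases h3 : pat = "every_two"
  · subst h3
    rw [if_neg (by decide), if_neg (by decide), if_pos (by decide)]
    have hstep : ((PySem.Dict.ofList [("alternate", (2:Int)), ("every_two", 3), ("every_three", 4)]).getD "every_two" 1) = 3 := by decide
    simp only [hstep]
    exact pv_etwo s (e+1)
  by_cases h4 : pat = "every_three"
  · subst h4
    rw [if_neg (by decide), if_neg (by decide), if_neg (by decide), if_pos (by decide)]
    have hstep : ((PySem.Dict.ofList [("alternate", (2:Int)), ("every_two", 3), ("every_three", 4)]).getD "every_three" 1) = 4 := by decide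
    simp only [hstep]
    exact pv_ethree s (e+1)
  · have hstep : ((PySem.Dict.ofList [("alternate", (2:Int)), ("every_two", 3), ("every_three", 4)]).getD pat 1) = 1 := by
      have e2 : ("alternate" == pat) = false := by simp [Ne.symm h2]
      have e3 : ("every_two" == pat) = false := by simp [Ne.symm h3]
      have e4 : ("every_three" == pat) = false := by simp [Ne.symm h4]
      simp [PySem.Dict.ofList, PySem.Dict.getD, PySem.Dict.get?, PySem.Dict.empty,
        PySem.Dict.update, PySem.Dict.insert, List.find?, e2, e3, e4]
    rw [if_neg (by simp [h1]), if_neg (by simp [h2]), if_neg (by simp [h3]), if_neg (by simp [h4])]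
    simp only [hstep]
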